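-- pv_equiv track=rewrite | github.com/juancruzana/Global_Python | funciones_clase_detector.py | verificar_diagonal
-- ===== SOURCE A (Python) =====
-- def verificar_diagonal(adn):
--
--     contador = 0
--     bases_repetidas = set()
--
--     #Bucle que recorre la lista de forma descendente de izzquierda a derecha
--     # y = recorre los elementos de la lista(filas)
--     for y in range(len(adn)-3):
--         #x = recorre las filas
--         for x in range(len(adn[y])-3):
--             if adn[y][x] == adn[y+1][x+1] == adn[y+2][x+2] == adn[y+3][x+3]:
--                 bases_repetidas.add(adn[y][x])
--                 contador +=1
--
--     #Bucle que recorre de manera descendente de derecha a izquierda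
--     for y in range(len(adn)-3):
--
--         for x in range(3,len(adn[y])):
--             if adn[y][x] == adn[y+1][x-1] == adn[y+2][x-2] == adn[y+3][x-3]:
--                     bases_repetidas.add(adn[y][x])
--                     contador +=1
--
--     return  bases_repetidas,contador
-- ===== SOURCE B (Python) =====
-- def _pass(adn, delta, bases, contador):
--     # one sweep over the rows, maintaining for every column the length of the
--     # current run of equal cells along the (delta = -1: down-right, +1: down-left) diagonal
--     run_prev = []
--     prev_row = []
--     for row in adn:
--         run = []
--         for x, v in enumerate(row):
--             j = x + delta
--             if 0 <= j < len(prev_row) and prev_row[j] == v: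
--                 r = run_prev[j] + 1
--             else:
--                 r = 1
--             run.append(r)
--             if r >= 4:
--                 contador += 1
--                 bases.add(v)
--         run_prev = run
--         prev_row = row
--     return contador
--
-- def verificar_diagonal(adn):
--     bases = set()
--     contador = _pass(adn, -1, bases, 0)
--     contador = _pass(adn, 1, bases, contador)
--     return bases, contador
-- ===== Notes on version B (the rewrite author's own statement) =====
-- stated objective: alternative
-- what changed: Replaces the per-cell four-element diagonal window comparison by two row-by-row dynamic-programming sweeps that maintain, per column, the length of the current run of equal cells along each diagonal direction, counting a window whenever a run reaches length 4 (windows counted at their end cell instead of their start cell).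
import Mathlib
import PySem

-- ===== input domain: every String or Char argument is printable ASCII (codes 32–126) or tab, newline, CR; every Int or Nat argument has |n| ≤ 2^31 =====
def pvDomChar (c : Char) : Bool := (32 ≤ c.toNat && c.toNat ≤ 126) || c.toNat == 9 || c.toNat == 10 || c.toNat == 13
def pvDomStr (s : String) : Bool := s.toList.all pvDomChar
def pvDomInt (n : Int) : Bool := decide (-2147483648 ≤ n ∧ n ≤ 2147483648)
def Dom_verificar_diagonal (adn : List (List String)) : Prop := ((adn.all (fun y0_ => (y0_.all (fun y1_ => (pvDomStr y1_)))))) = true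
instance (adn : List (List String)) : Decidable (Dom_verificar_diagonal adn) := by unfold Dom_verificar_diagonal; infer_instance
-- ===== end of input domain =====

-- B replaces A's per-cell 4-element diagonal window comparison by two row-DP sweeps over
-- diagonal run lengths (same cost; a different algorithm). Equality proved on Pre_: grids
-- that are rectangular or have fewer than 4 rows.

-- ===== PORT A =====
-- adn[y][x] as an Option (none exactly where Python raises IndexError; A's chained
-- comparison evaluates the two sides of each '==' before short-circuiting, so inside
-- Pre_ every access below is `some`, and outside Pre_ nothing is claimed).
def pvCell (adn : List (List String)) (y x : Int) : Option String :=
  (PySem.List.pyGet? adn y).bind (fun r => PySem.List.pyGet? r x)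

def verificar_diagonal (adn : List (List String)) : List String × Int :=
  -- first loop: down-right windows by start cell
  let s1 :=
    (PySem.List.pyRange 0 (PySem.List.len adn - 3) 1).foldl (fun st y =>
      (PySem.List.pyRange 0 (PySem.List.len (PySem.List.pyGetD adn y []) - 3) 1).foldl (fun st x =>
        match pvCell adn y x, pvCell adn (y+1) (x+1), pvCell adn (y+2) (x+2), pvCell adn (y+3) (x+3) with
        | some a, some b, some c, some d =>
            if a = b ∧ b = c ∧ c = d then (PySem.Set.add st.1 a, st.2 + 1) else st
        | _, _, _, _ => st) st)
      (([] : List String), (0 : Int))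
  -- second loop: down-left windows by start cell
  (PySem.List.pyRange 0 (PySem.List.len adn - 3) 1).foldl (fun st y =>
    (PySem.List.pyRange 3 (PySem.List.len (PySem.List.pyGetD adn y [])) 1).foldl (fun st x =>
      match pvCell adn y x, pvCell adn (y+1) (x-1), pvCell adn (y+2) (x-2), pvCell adn (y+3) (x-3) with
      | some a, some b, some c, some d =>
          if a = b ∧ b = c ∧ c = d then (PySem.Set.add st.1 a, st.2 + 1) else st
      | _, _, _, _ => st) st) s1

-- ===== PORT B =====
-- one row of a sweep: `for x, v in enumerate(row)` with the enumerate counter carried in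
-- the fold state; state = (x, run-so-far, (bases, contador))
def pvRowStep (delta : Int) (runPrev : List Int) (prevRow : List String)
    (st : List String × Int) (row : List String) : List Int × (List String × Int) :=
  let res := row.foldl (fun (acc : Int × List Int × (List String × Int)) v =>
      let j := acc.1 + delta
      let r : Int :=
        if 0 ≤ j ∧ j < (PySem.List.len prevRow) ∧ PySem.List.pyGetD prevRow j "" = v
        then PySem.List.pyGetD runPrev j 0 + 1 else 1
      (acc.1 + 1, acc.2.1 ++ [r],
        if 4 ≤ r then (PySem.Set.add acc.2.2.1 v, acc.2.2.2 + 1) else acc.2.2))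
    (0, [], st)
  (res.2.1, res.2.2)

-- one sweep (`_pass` in Source B): fold over the rows carrying (run_prev, prev_row, (bases, contador))
def pvPass (adn : List (List String)) (delta : Int) (st0 : List String × Int) :
    List String × Int :=
  (adn.foldl (fun (s : List Int × List String × (List String × Int)) row =>
      let res := pvRowStep delta s.1 s.2.1 s.2.2 row
      (res.1, row, res.2))
    ([], [], st0)).2.2

def verificar_diagonal_alt (adn : List (List String)) : List String × Int :=
  let c1 := pvPass adn (-1) ([], 0)
  pvPass adn 1 c1

-- ===== PRECONDITION & SPEC =====
-- Pre_ excludes ragged grids with 4 or more rows and some row of length 4 or more: on those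
-- A's chained comparison usually raises IndexError on a shorter lower row, and where it
-- happens to return, A's per-row window bounds silently skip geometrically present diagonal
-- windows (see the cite).
def Pre_verificar_diagonal (adn : List (List String)) : Prop :=
  adn.length < 4 ∨ (∀ r ∈ adn, r.length < 4) ∨ ∀ r ∈ adn, r.length = (adn.headD []).length
instance (adn : List (List String)) : Decidable (Pre_verificar_diagonal adn) := by
  unfold Pre_verificar_diagonal; infer_instance

def pvWitness_verificar_diagonal : List (List String) :=
  [["A","C","A","T"],["T","A","C","A"],["G","T","A","C"],["C","G","T","A"]]

def Spec_verificar_diagonal (adn : List (List String)) (out : List String × Int) : Prop := out = verificar_diagonal_alt adn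
instance (adn : List (List String)) (out : List String × Int) : Decidable (Spec_verificar_diagonal adn out) := by unfold Spec_verificar_diagonal; infer_instance

-- ===== CLAIM (what is proved, stated in full; the proofs are below) =====
def Claim_equal_verificar_diagonal : Prop := ∀ (adn : List (List String)), Dom_verificar_diagonal adn → Pre_verificar_diagonal adn → Spec_verificar_diagonal adn (verificar_diagonal adn)

-- ===== LEMMAS AND PROOFS =====

-- ---- generic event-fold machinery ----
-- running a sequence of "add this base and bump the counter" events
def pvAddAll (W : List String) (st : List String × Int) : List String × Int :=
  (W.foldl PySem.Set.add st.1, st.2 + W.length)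

theorem pvAddAll_nil (st : List String × Int) : pvAddAll [] st = st := by
  simp [pvAddAll]

theorem pvAddAll_cons (v : String) (W : List String) (st : List String × Int) :
    pvAddAll (v :: W) st = pvAddAll W (PySem.Set.add st.1 v, st.2 + 1) := by
  simp [pvAddAll]; omega

theorem pvAddAll_append (W1 W2 : List String) (st : List String × Int) :
    pvAddAll (W1 ++ W2) st = pvAddAll W2 (pvAddAll W1 st) := by
  simp [pvAddAll]; omega

theorem pvFoldl_events {a : Type} (l : List a) (P : a → Prop) [DecidablePred P]
    (g : a → String) (st0 : List String × Int) :
    l.foldl (fun st x => if P x then (PySem.Set.add st.1 (g x), st.2 + 1) else st) st0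
      = pvAddAll (l.filterMap (fun x => if P x then some (g x) else none)) st0 := by
  induction l generalizing st0 with
  | nil => simp [pvAddAll_nil]
  | cons x xs ih =>
      by_cases h : P x
      · simp [h, ih, pvAddAll_cons]
      · simp [h, ih]

theorem pvFoldl_addAll {a : Type} (ys : List a) (h : a → List String) (st0 : List String × Int) :
    ys.foldl (fun st y => pvAddAll (h y) st) st0 = pvAddAll (ys.flatMap h) st0 := by
  induction ys generalizing st0 with
  | nil => simp [pvAddAll_nil]
  | cons y ys ih => simp [ih, pvAddAll_append]

-- ---- B-side: spec of one sweep as a list of events ----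
def pvRunVal (delta : Int) (prevRow : List String) (runPrev : List Int) (x : Int) (v : String) : Int :=
  if 0 ≤ x + delta ∧ x + delta < PySem.List.len prevRow ∧ PySem.List.pyGetD prevRow (x + delta) "" = v
  then PySem.List.pyGetD runPrev (x + delta) 0 + 1 else 1

def pvRunsL (delta : Int) (prevRow : List String) (runPrev : List Int) : Int → List String → List Int
  | _, [] => []
  | n, v :: vs => pvRunVal delta prevRow runPrev n v :: pvRunsL delta prevRow runPrev (n + 1) vs

def pvEvL (delta : Int) (prevRow : List String) (runPrev : List Int) : Int → List String → List String
  | _, [] => []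
  | n, v :: vs => (if 4 ≤ pvRunVal delta prevRow runPrev n v then [v] else [])
      ++ pvEvL delta prevRow runPrev (n + 1) vs

def pvWp (delta : Int) : List String → List Int → List (List String) → List String
  | _, _, [] => []
  | prevRow, runPrev, row :: rest =>
      pvEvL delta prevRow runPrev 0 row ++ pvWp delta row (pvRunsL delta prevRow runPrev 0 row) rest

theorem pvRowAux (delta : Int) (runPrev : List Int) (prevRow : List String) :
    ∀ (row : List String) (n : Int) (acc : List Int) (st : List String × Int),
    row.foldl (fun (acc : Int × List Int × (List String × Int)) v =>
      let j := acc.1 + delta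
      let r : Int :=
        if 0 ≤ j ∧ j < (PySem.List.len prevRow) ∧ PySem.List.pyGetD prevRow j "" = v
        then PySem.List.pyGetD runPrev j 0 + 1 else 1
      (acc.1 + 1, acc.2.1 ++ [r],
        if 4 ≤ r then (PySem.Set.add acc.2.2.1 v, acc.2.2.2 + 1) else acc.2.2)) (n, acc, st)
      = (n + row.length, acc ++ pvRunsL delta prevRow runPrev n row,
         pvAddAll (pvEvL delta prevRow runPrev n row) st) := by
  intro row
  induction row with
  | nil => intro n acc st; simp [pvRunsL, pvEvL, pvAddAll_nil]
  | cons v vs ih =>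
      intro n acc st
      simp only [List.foldl_cons]
      rw [ih]
      simp only [pvRunsL, pvEvL, pvRunVal, pvAddAll_append, Prod.mk.injEq, List.length_cons]
      refine ⟨by push_cast; ring, by simp, ?_⟩
      congr 1
      split <;> (try split) <;> simp [pvAddAll]

theorem pvRowStep_eq (delta : Int) (runPrev : List Int) (prevRow : List String)
    (st : List String × Int) (row : List String) :
    pvRowStep delta runPrev prevRow st row
      = (pvRunsL delta prevRow runPrev 0 row, pvAddAll (pvEvL delta prevRow runPrev 0 row) st) := by
  simp only [pvRowStep]
  rw [pvRowAux delta runPrev prevRow row 0 [] st]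
  simp

theorem pvPassAux (delta : Int) :
    ∀ (rows : List (List String)) (prevRow : List String) (runPrev : List Int)
      (st : List String × Int),
    (rows.foldl (fun (s : List Int × List String × (List String × Int)) row =>
        let res := pvRowStep delta s.1 s.2.1 s.2.2 row
        (res.1, row, res.2)) (runPrev, prevRow, st)).2.2
      = pvAddAll (pvWp delta prevRow runPrev rows) st := by
  intro rows
  induction rows with
  | nil => intro prevRow runPrev st; simp [pvWp, pvAddAll_nil]
  | cons row rest ih =>
      intro prevRow runPrev st
      rw [List.foldl_cons]
      have hstep : (let res := pvRowStep delta (runPrev, prevRow, st).1 (runPrev, prevRow, st).2.1 (runPrev, prevRow, st).2.2 row; ((res.1, row, res.2) : List Int × List String × (List String × Int)))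
          = (pvRunsL delta prevRow runPrev 0 row, row,
             pvAddAll (pvEvL delta prevRow runPrev 0 row) st) := by
        simp [pvRowStep_eq]
      rw [hstep, ih]
      simp [pvWp, pvAddAll_append]

theorem pvPass_eq (adn : List (List String)) (delta : Int) (st0 : List String × Int) :
    pvPass adn delta st0 = pvAddAll (pvWp delta [] [] adn) st0 := by
  simpa [pvPass] using pvPassAux delta adn [] [] st0

-- ---- B-side: indexed characterization via diagonal run lengths ----
def pvRowN (adn : List (List String)) (k : Nat) : List String := adn.getD k []
def pvCellN (adn : List (List String)) (y x : Nat) : String := (pvRowN adn y).getD x ""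

def pvRl (adn : List (List String)) (delta : Int) : Nat → Int → Int
  | 0, _ => 1
  | y + 1, x =>
      if 0 ≤ x + delta ∧ x + delta < PySem.List.len (pvRowN adn y)
           ∧ PySem.List.pyGetD (pvRowN adn y) (x + delta) "" = PySem.List.pyGetD (pvRowN adn (y + 1)) x ""
      then pvRl adn delta y (x + delta) + 1 else 1

def pvRlRow (adn : List (List String)) (delta : Int) (y : Nat) : List Int :=
  (List.range (pvRowN adn y).length).map (fun (x : Nat) => pvRl adn delta y (x : Int))

def pvRowEv (adn : List (List String)) (delta : Int) (y : Nat) : List String :=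
  (List.range (pvRowN adn y).length).filterMap (fun (x : Nat) =>
    if 4 ≤ pvRl adn delta y (x : Int) then some (pvCellN adn y x) else none)

theorem pvRl_ge_one (adn : List (List String)) (delta : Int) (y : Nat) (x : Int) :
    1 ≤ pvRl adn delta y x := by
  induction y generalizing x with
  | zero => simp [pvRl]
  | succ y ih =>
      rw [pvRl]
      split
      · have := ih (x + delta); omega
      · omega

theorem pvRl_le (adn : List (List String)) (delta : Int) :
    ∀ (y : Nat) (x : Int), pvRl adn delta y x ≤ (y : Int) + 1 := by
  intro y
  induction y with
  | zero => intro x; simp [pvRl]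
  | succ y ih =>
      intro x
      rw [pvRl]
      split
      · have := ih (x + delta); push_cast; omega
      · push_cast; omega

theorem pvRl_ge_succ (adn : List (List String)) (delta : Int) (y : Nat) (x : Int) (k : Int)
    (hk : 1 ≤ k) :
    k + 1 ≤ pvRl adn delta (y + 1) x ↔
      (0 ≤ x + delta ∧ x + delta < PySem.List.len (pvRowN adn y)
          ∧ PySem.List.pyGetD (pvRowN adn y) (x + delta) "" = PySem.List.pyGetD (pvRowN adn (y + 1)) x "")
        ∧ k ≤ pvRl adn delta y (x + delta) := by
  rw [pvRl]
  split
  · rename_i h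
    exact ⟨fun h2 => ⟨h, by omega⟩, fun ⟨_, h2⟩ => by omega⟩
  · rename_i h
    constructor
    · intro h2; omega
    · rintro ⟨hc, _⟩; exact absurd hc h

-- previous row / previous run row fed into the sweep at row index k
def pvPrevR (adn : List (List String)) : Nat → List String
  | 0 => []
  | k + 1 => pvRowN adn k

def pvPrevRl (adn : List (List String)) (delta : Int) : Nat → List Int
  | 0 => []
  | k + 1 => pvRlRow adn delta k

theorem pvRunsL_length (delta : Int) (p : List String) (rp : List Int) :
    ∀ (vs : List String) (n : Int), (pvRunsL delta p rp n vs).length = vs.length := by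
  intro vs
  induction vs with
  | nil => intro n; simp [pvRunsL]
  | cons v vs ih => intro n; simp [pvRunsL, ih]

theorem pvRunsL_getD (delta : Int) (p : List String) (rp : List Int) :
    ∀ (vs : List String) (n : Int) (i : Nat), i < vs.length →
      (pvRunsL delta p rp n vs).getD i 0 = pvRunVal delta p rp (n + i) (vs.getD i "") := by
  intro vs
  induction vs with
  | nil => intro n i h; simp at h
  | cons v vs ih =>
      intro n i h
      cases i with
      | zero => simp [pvRunsL]
      | succ i =>
          simp only [pvRunsL, List.getD_cons_succ]
          rw [ih (n + 1) i (by simpa using h)]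
          congr 1
          push_cast; ring

theorem pvEvL_eq (delta : Int) (p : List String) (rp : List Int) :
    ∀ (vs : List String) (n : Int),
      pvEvL delta p rp n vs = (List.range vs.length).filterMap (fun (i : Nat) =>
        if 4 ≤ pvRunVal delta p rp (n + (i : Int)) (vs.getD i "") then some (vs.getD i "") else none) := by
  intro vs
  induction vs with
  | nil => intro n; simp [pvEvL]
  | cons v vs ih =>
      intro n
      simp only [List.length_cons]
      rw [List.range_succ_eq_map]
      simp only [pvEvL, List.filterMap_cons, List.filterMap_map]
      rw [ih (n + 1)]
      have hcomp : ((fun (i : Nat) => if 4 ≤ pvRunVal delta p rp (n + (i : Int)) ((v :: vs).getD i "")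
            then some ((v :: vs).getD i "") else none) ∘ Nat.succ)
          = (fun (i : Nat) => if 4 ≤ pvRunVal delta p rp ((n + 1) + (i : Int)) (vs.getD i "")
            then some (vs.getD i "") else none) := by
        funext i
        simp only [Function.comp, Nat.succ_eq_add_one, List.getD_cons_succ]
        congr 2
        push_cast; ring
      rw [hcomp]
      split <;> rename_i h <;> simp [h]

theorem pvRunVal_eq (adn : List (List String)) (delta : Int) (k : Nat) (x : Nat) :
    pvRunVal delta (pvPrevR adn k) (pvPrevRl adn delta k) (x : Int) ((pvRowN adn k).getD x "")
      = pvRl adn delta k (x : Int) := by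
  cases k with
  | zero =>
      simp only [pvPrevR, pvPrevRl, pvRunVal, pvRl]
      rw [if_neg]
      simp [PySem.List.len]
      omega
  | succ k =>
      simp only [pvPrevR, pvPrevRl, pvRunVal]
      rw [pvRl]
      rw [PySem.List.pyGetD_natCast (pvRowN adn (k + 1)) x ""]
      split
      · rename_i h
        congr 1
        obtain ⟨h0, h1, _⟩ := h
        have hx : (x : Int) + delta = ((((x : Int) + delta).toNat : Nat) : Int) := by omega
        rw [hx, PySem.List.pyGetD_natCast]
        have hlt : ((x : Int) + delta).toNat < (pvRowN adn k).length := by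
          simp [PySem.List.len_eq] at h1; omega
        rw [pvRlRow, List.getD_eq_getElem _ _ (by simpa using hlt)]
        simp
      · rfl

theorem pvRunsL_eq_rlRow (adn : List (List String)) (delta : Int) (k : Nat) :
    pvRunsL delta (pvPrevR adn k) (pvPrevRl adn delta k) 0 (pvRowN adn k)
      = pvRlRow adn delta k := by
  apply List.ext_getElem
  · simp [pvRunsL_length, pvRlRow]
  · intro i h1 h2
    have hi : i < (pvRowN adn k).length := by simpa [pvRunsL_length] using h1
    have hg := pvRunsL_getD delta (pvPrevR adn k) (pvPrevRl adn delta k) (pvRowN adn k) 0 i hi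
    rw [List.getD_eq_getElem _ _ h1] at hg
    rw [hg]
    have := pvRunVal_eq adn delta k i
    rw [show (0 : Int) + i = (i : Int) by ring, this]
    simp [pvRlRow]

theorem pvEvL_eq_rowEv (adn : List (List String)) (delta : Int) (k : Nat) :
    pvEvL delta (pvPrevR adn k) (pvPrevRl adn delta k) 0 (pvRowN adn k)
      = pvRowEv adn delta k := by
  rw [pvEvL_eq]
  unfold pvRowEv
  apply List.filterMap_congr
  intro i hi
  have hi' : i < (pvRowN adn k).length := by simpa using hi
  have := pvRunVal_eq adn delta k i
  rw [show (0 : Int) + (i : Int) = (i : Int) by ring, this]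
  simp [pvCellN]

theorem pvWpAux (adn : List (List String)) (delta : Int) :
    ∀ (m k : Nat), adn.length - k = m →
      pvWp delta (pvPrevR adn k) (pvPrevRl adn delta k) (adn.drop k)
        = (List.range m).flatMap (fun i => pvRowEv adn delta (k + i)) := by
  intro m
  induction m with
  | zero =>
      intro k hk
      rw [List.drop_of_length_le (by omega)]
      simp [pvWp]
  | succ m ih =>
      intro k hk
      have hklt : k < adn.length := by omega
      rw [List.drop_eq_getElem_cons hklt]
      have hrow : adn[k] = pvRowN adn k := by
        simp [pvRowN, List.getD_eq_getElem?_getD, List.getElem?_eq_getElem hklt]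
      rw [hrow]
      show pvEvL delta (pvPrevR adn k) (pvPrevRl adn delta k) 0 (pvRowN adn k)
          ++ pvWp delta (pvRowN adn k)
              (pvRunsL delta (pvPrevR adn k) (pvPrevRl adn delta k) 0 (pvRowN adn k))
              (adn.drop (k + 1)) = _
      rw [pvEvL_eq_rowEv, pvRunsL_eq_rlRow]
      have hprev : pvRowN adn k = pvPrevR adn (k + 1) := rfl
      have hprevrl : pvRlRow adn delta k = pvPrevRl adn delta (k + 1) := rfl
      rw [hprev, hprevrl, ih (k + 1) (by omega)]
      rw [List.range_succ_eq_map]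
      simp only [List.flatMap_cons, List.flatMap_map, Nat.add_zero]
      congr 1
      congr 1
      funext i
      congr 1
      omega

theorem pvWp_eq_flat (adn : List (List String)) (delta : Int) :
    pvWp delta [] [] adn = (List.range adn.length).flatMap (pvRowEv adn delta) := by
  have := pvWpAux adn delta adn.length 0 (by omega)
  simpa [pvPrevR, pvPrevRl] using this

theorem alt_eq (adn : List (List String)) :
    verificar_diagonal_alt adn
      = pvAddAll ((List.range adn.length).flatMap (pvRowEv adn 1))
          (pvAddAll ((List.range adn.length).flatMap (pvRowEv adn (-1))) ([], 0)) := by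
  simp only [verificar_diagonal_alt]
  rw [pvPass_eq, pvPass_eq, pvWp_eq_flat, pvWp_eq_flat]

-- ---- A-side: the two loops as event lists ----
abbrev pvChainDR (adn : List (List String)) (y x : Nat) : Prop :=
  pvCellN adn y x = pvCellN adn (y+1) (x+1) ∧ pvCellN adn (y+1) (x+1) = pvCellN adn (y+2) (x+2)
    ∧ pvCellN adn (y+2) (x+2) = pvCellN adn (y+3) (x+3)

abbrev pvChainDL (adn : List (List String)) (y x : Nat) : Prop :=
  pvCellN adn y (x+3) = pvCellN adn (y+1) (x+2) ∧ pvCellN adn (y+1) (x+2) = pvCellN adn (y+2) (x+1)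
    ∧ pvCellN adn (y+2) (x+1) = pvCellN adn (y+3) x

-- ---- reindexing lemmas ----
theorem pvFilterMap_range_front3 {a : Type} (n : Nat) (F : Nat → Option a)
    (h : ∀ x < 3, F x = none) :
    (List.range n).filterMap F = (List.range (n - 3)).filterMap (fun x => F (x + 3)) := by
  by_cases hn : 3 ≤ n
  · rw [show n = 3 + (n - 3) by omega, List.range_add]
    rw [List.filterMap_append, List.filterMap_map]
    rw [show (List.range 3).filterMap F = [] from by
      simp [List.range_succ, h 0 (by omega), h 1 (by omega), h 2 (by omega)]]
    simp only [List.nil_append]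
    rw [show 3 + (n - 3) - 3 = n - 3 by omega]
    congr 1
    funext x
    simp [Function.comp, Nat.add_comm]
  · rw [show n - 3 = 0 by omega]
    simp only [List.range_zero, List.filterMap_nil]
    rw [List.filterMap_eq_nil_iff.mpr]
    intro x hx
    exact h x (by simp at hx; omega)

theorem pvFilterMap_range_back3 {a : Type} (n : Nat) (F : Nat → Option a)
    (h : ∀ x, n - 3 ≤ x → F x = none) :
    (List.range n).filterMap F = (List.range (n - 3)).filterMap F := by
  by_cases hn : 3 ≤ n
  · rw [show n = (n - 3) + 3 by omega, List.range_add]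
    rw [List.filterMap_append, List.filterMap_map]
    rw [show ((List.range 3).filterMap (F ∘ (fun x => n - 3 + x))) = [] from by
      simp only [List.range_succ, List.range_zero]
      simp [Function.comp, h (n - 3) (by omega), h (n - 3 + 1) (by omega),
        h (n - 3 + 2) (by omega)]]
    rw [show (n - 3) + 3 - 3 = n - 3 by omega]
    simp
  · rw [show n - 3 = 0 by omega]
    simp only [List.range_zero, List.filterMap_nil]
    rw [List.filterMap_eq_nil_iff.mpr]
    intro x hx
    exact h x (by omega)

theorem pvFlatMap_range_shift3 (n : Nat) (h : Nat → List String) (h3 : ∀ y < 3, h y = [])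
    (hn : 3 ≤ n) :
    (List.range n).flatMap h = (List.range (n - 3)).flatMap (fun y => h (y + 3)) := by
  rw [show n = 3 + (n - 3) by omega, List.range_add]
  rw [List.flatMap_append, List.flatMap_map]
  rw [show (List.range 3).flatMap h = [] from by
    simp [List.range_succ, h3 0 (by omega), h3 1 (by omega), h3 2 (by omega)]]
  rw [show 3 + (n - 3) - 3 = n - 3 by omega]
  simp only [List.nil_append]
  congr 1
  funext y
  simp [Nat.add_comm]

theorem pvRowEv_nil (adn : List (List String)) (delta : Int) (y : Nat) (hy : y < 3) :
    pvRowEv adn delta y = [] := by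
  rw [pvRowEv, List.filterMap_eq_nil_iff.mpr]
  intro x hx
  rw [if_neg]
  have h1 := pvRl_le adn delta y (x : Int)
  omega

-- ---- the two sweeps coincide with A's two loops (rectangular grid) ----
theorem pvRl4_iff (adn : List (List String)) (delta : Int) (y : Nat) (x : Int) :
    4 ≤ pvRl adn delta (y + 3) x ↔
      (0 ≤ x + delta ∧ x + delta < PySem.List.len (pvRowN adn (y + 2))
          ∧ PySem.List.pyGetD (pvRowN adn (y + 2)) (x + delta) ""
            = PySem.List.pyGetD (pvRowN adn (y + 3)) x "")
      ∧ (0 ≤ x + delta + delta ∧ x + delta + delta < PySem.List.len (pvRowN adn (y + 1))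
          ∧ PySem.List.pyGetD (pvRowN adn (y + 1)) (x + delta + delta) ""
            = PySem.List.pyGetD (pvRowN adn (y + 2)) (x + delta) "")
      ∧ (0 ≤ x + delta + delta + delta ∧ x + delta + delta + delta < PySem.List.len (pvRowN adn y)
          ∧ PySem.List.pyGetD (pvRowN adn y) (x + delta + delta + delta) ""
            = PySem.List.pyGetD (pvRowN adn (y + 1)) (x + delta + delta) "") := by
  have h3 := pvRl_ge_succ adn delta (y + 2) x 3 (by norm_num)
  have h2 := pvRl_ge_succ adn delta (y + 1) (x + delta) 2 (by norm_num)
  have h1 := pvRl_ge_succ adn delta y (x + delta + delta) 1 (by norm_num)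
  have hone := pvRl_ge_one adn delta y (x + delta + delta + delta)
  norm_num at h3 h2 h1
  rw [show y + 3 = (y + 2) + 1 from by omega, h3,
      show y + 2 = (y + 1) + 1 from by omega, h2, h1]
  constructor
  · rintro ⟨c3, c2, c1, -⟩; exact ⟨c3, c2, c1⟩
  · rintro ⟨c3, c2, c1⟩; exact ⟨c3, c2, c1, hone⟩

theorem pvCond_iff (adn : List (List String)) (C : Nat)
    (hlen : ∀ y < adn.length, (pvRowN adn y).length = C)
    (a b ja xb : Nat) (ha : a < adn.length) (hja : ja < C) :
    ((0 : Int) ≤ (ja : Int) ∧ (ja : Int) < PySem.List.len (pvRowN adn a)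
        ∧ PySem.List.pyGetD (pvRowN adn a) (ja : Int) ""
          = PySem.List.pyGetD (pvRowN adn b) (xb : Int) "")
      ↔ pvCellN adn a ja = pvCellN adn b xb := by
  simp [PySem.List.len_eq, PySem.List.pyGetD_natCast, pvCellN, hlen a ha, hja]

theorem pvRowEv_DR (adn : List (List String)) (C : Nat)
    (hlen : ∀ y < adn.length, (pvRowN adn y).length = C)
    (y : Nat) (hy : y + 3 < adn.length) :
    pvRowEv adn (-1) (y + 3)
      = (List.range (C - 3)).filterMap (fun x =>
          if pvChainDR adn y x then some (pvCellN adn y x) else none) := by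
  have hiff : ∀ (x' : Nat), x' + 3 < C →
      ((4 : Int) ≤ pvRl adn (-1) (y + 3) ((x' + 3 : Nat) : Int) ↔ pvChainDR adn y x') := by
    intro x' hx'
    have e1 : ((x' + 3 : Nat) : Int) + (-1) = ((x' + 2 : Nat) : Int) := by push_cast; ring
    have e2 : ((x' + 2 : Nat) : Int) + (-1) = ((x' + 1 : Nat) : Int) := by push_cast; ring
    have e3 : ((x' + 1 : Nat) : Int) + (-1) = ((x' : Nat) : Int) := by push_cast; ring
    rw [pvRl4_iff, e1, e2, e3]
    rw [pvCond_iff adn C hlen (y + 2) (y + 3) (x' + 2) (x' + 3) (by omega) (by omega),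
        pvCond_iff adn C hlen (y + 1) (y + 2) (x' + 1) (x' + 2) (by omega) (by omega),
        pvCond_iff adn C hlen y (y + 1) x' (x' + 1) (by omega) (by omega)]
    unfold pvChainDR
    constructor
    · rintro ⟨c3, c2, c1⟩; exact ⟨c1, c2, c3⟩
    · rintro ⟨c1, c2, c3⟩; exact ⟨c3, c2, c1⟩
  rw [pvRowEv, hlen (y + 3) hy]
  rw [pvFilterMap_range_front3 C _ (by
    intro x hx
    rw [if_neg]
    intro habs
    have := (pvRl4_iff adn (-1) y (x : Int)).mp habs
    obtain ⟨-, -, hc1⟩ := this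
    omega)]
  apply List.filterMap_congr
  intro x' hx'
  have hx'C : x' + 3 < C := by
    have := List.mem_range.mp hx'; omega
  by_cases hc : pvChainDR adn y x'
  · rw [if_pos ((hiff x' hx'C).mpr hc), if_pos hc]
    obtain ⟨e1, e2, e3⟩ := hc
    rw [show pvCellN adn (y + 3) (x' + 3) = pvCellN adn y x' from (e1.trans (e2.trans e3)).symm]
  · rw [if_neg (fun h => hc ((hiff x' hx'C).mp h)), if_neg hc]

theorem pvRowEv_DL (adn : List (List String)) (C : Nat)
    (hlen : ∀ y < adn.length, (pvRowN adn y).length = C)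
    (y : Nat) (hy : y + 3 < adn.length) :
    pvRowEv adn 1 (y + 3)
      = (List.range (C - 3)).filterMap (fun x =>
          if pvChainDL adn y x then some (pvCellN adn y (x + 3)) else none) := by
  have hiff : ∀ (x' : Nat), x' + 3 < C →
      ((4 : Int) ≤ pvRl adn 1 (y + 3) ((x' : Nat) : Int) ↔ pvChainDL adn y x') := by
    intro x' hx'
    have e1 : ((x' : Nat) : Int) + 1 = ((x' + 1 : Nat) : Int) := by push_cast; ring
    have e2 : ((x' + 1 : Nat) : Int) + 1 = ((x' + 2 : Nat) : Int) := by push_cast; ring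
    have e3 : ((x' + 2 : Nat) : Int) + 1 = ((x' + 3 : Nat) : Int) := by push_cast; ring
    rw [pvRl4_iff, e1, e2, e3]
    rw [pvCond_iff adn C hlen (y + 2) (y + 3) (x' + 1) x' (by omega) (by omega),
        pvCond_iff adn C hlen (y + 1) (y + 2) (x' + 2) (x' + 1) (by omega) (by omega),
        pvCond_iff adn C hlen y (y + 1) (x' + 3) (x' + 2) (by omega) (by omega)]
    unfold pvChainDL
    constructor
    · rintro ⟨c3, c2, c1⟩; exact ⟨c1, c2, c3⟩
    · rintro ⟨c1, c2, c3⟩; exact ⟨c3, c2, c1⟩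
  rw [pvRowEv, hlen (y + 3) hy]
  rw [pvFilterMap_range_back3 C _ (by
    intro x hx
    rw [if_neg]
    intro habs
    have := (pvRl4_iff adn 1 y (x : Int)).mp habs
    obtain ⟨-, -, hc1⟩ := this
    obtain ⟨-, hb, -⟩ := hc1
    rw [PySem.List.len_eq, hlen y (by omega)] at hb
    omega)]
  apply List.filterMap_congr
  intro x' hx'
  have hx'C : x' + 3 < C := by
    have := List.mem_range.mp hx'; omega
  by_cases hc : pvChainDL adn y x'
  · rw [if_pos ((hiff x' hx'C).mpr hc), if_pos hc]
    obtain ⟨e1, e2, e3⟩ := hc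
    rw [show pvCellN adn (y + 3) x' = pvCellN adn y (x' + 3) from (e1.trans (e2.trans e3)).symm]
  · rw [if_neg (fun h => hc ((hiff x' hx'C).mp h)), if_neg hc]

theorem B_DR_eq (adn : List (List String)) (C : Nat)
    (hlen : ∀ y < adn.length, (pvRowN adn y).length = C) (hR : 4 ≤ adn.length) :
    (List.range adn.length).flatMap (pvRowEv adn (-1))
      = (List.range (adn.length - 3)).flatMap (fun y =>
          (List.range (C - 3)).filterMap (fun x =>
            if pvChainDR adn y x then some (pvCellN adn y x) else none)) := by
  rw [pvFlatMap_range_shift3 adn.length (pvRowEv adn (-1))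
      (fun y hy => pvRowEv_nil adn (-1) y hy) (by omega)]
  rw [List.flatMap_def, List.flatMap_def]
  congr 1
  apply List.map_congr_left
  intro y hy
  exact pvRowEv_DR adn C hlen y (by have := List.mem_range.mp hy; omega)

theorem B_DL_eq (adn : List (List String)) (C : Nat)
    (hlen : ∀ y < adn.length, (pvRowN adn y).length = C) (hR : 4 ≤ adn.length) :
    (List.range adn.length).flatMap (pvRowEv adn 1)
      = (List.range (adn.length - 3)).flatMap (fun y =>
          (List.range (C - 3)).filterMap (fun x =>
            if pvChainDL adn y x then some (pvCellN adn y (x+3)) else none)) := by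
  rw [pvFlatMap_range_shift3 adn.length (pvRowEv adn 1)
      (fun y hy => pvRowEv_nil adn 1 y hy) (by omega)]
  rw [List.flatMap_def, List.flatMap_def]
  congr 1
  apply List.map_congr_left
  intro y hy
  exact pvRowEv_DL adn C hlen y (by have := List.mem_range.mp hy; omega)

theorem pvCell_eq (adn : List (List String)) (C : Nat)
    (hlen : ∀ y < adn.length, (pvRowN adn y).length = C)
    (y x : Nat) (hy : y < adn.length) (hx : x < C) :
    pvCell adn (y : Int) (x : Int) = some (pvCellN adn y x) := by
  have hrow : pvRowN adn y = adn[y] := by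
    simp [pvRowN, List.getD_eq_getElem?_getD, List.getElem?_eq_getElem hy]
  have hxlen : x < adn[y].length := by rw [← hrow, hlen y hy]; exact hx
  unfold pvCell
  rw [PySem.List.pyGet?_natCast, List.getElem?_eq_getElem hy, Option.bind_some,
      PySem.List.pyGet?_natCast, List.getElem?_eq_getElem hxlen]
  congr 1
  rw [pvCellN, hrow, List.getD_eq_getElem _ _ hxlen]

theorem A_inner_DR (adn : List (List String)) (C : Nat)
    (hlen : ∀ y < adn.length, (pvRowN adn y).length = C)
    (y : Nat) (hy : y + 3 < adn.length) (st : List String × Int) :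
    (PySem.List.pyRange 0 (PySem.List.len (PySem.List.pyGetD adn (y : Int) []) - 3) 1).foldl
      (fun st x =>
        match pvCell adn (y : Int) x, pvCell adn ((y : Int)+1) (x+1),
              pvCell adn ((y : Int)+2) (x+2), pvCell adn ((y : Int)+3) (x+3) with
        | some a, some b, some c, some d =>
            if a = b ∧ b = c ∧ c = d then (PySem.Set.add st.1 a, st.2 + 1) else st
        | _, _, _, _ => st) st
    = pvAddAll ((List.range (C - 3)).filterMap (fun x =>
        if pvChainDR adn y x then some (pvCellN adn y x) else none)) st := by
  have hrowlen : PySem.List.len (PySem.List.pyGetD adn (y : Int) []) = (C : Int) := by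
    rw [PySem.List.pyGetD_natCast]
    rw [show adn.getD y [] = pvRowN adn y from rfl]
    rw [PySem.List.len_eq, hlen y (by omega)]
  rw [hrowlen, PySem.List.pyRange_one,
      show (((C : Int) - 3) - 0).toNat = C - 3 from by omega, List.foldl_map]
  rw [PySem.List.foldl_congr_mem _ _
      (fun st (x : Nat) => if pvChainDR adn y x
        then (PySem.Set.add st.1 (pvCellN adn y x), st.2 + 1) else st) st
      (by
        intro acc x hx
        have hx3 : x < C - 3 := List.mem_range.mp hx
        have ey1 : (y : Int) + 1 = ((y + 1 : Nat) : Int) := by push_cast; ring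
        have ey2 : (y : Int) + 2 = ((y + 2 : Nat) : Int) := by push_cast; ring
        have ey3 : (y : Int) + 3 = ((y + 3 : Nat) : Int) := by push_cast; ring
        have ex0 : (0 : Int) + (x : Int) = ((x : Nat) : Int) := by omega
        have ex1 : ((x : Nat) : Int) + 1 = ((x + 1 : Nat) : Int) := by push_cast; ring
        have ex2 : ((x : Nat) : Int) + 2 = ((x + 2 : Nat) : Int) := by push_cast; ring
        have ex3 : ((x : Nat) : Int) + 3 = ((x + 3 : Nat) : Int) := by push_cast; ring
        rw [ey1, ey2, ey3, ex0, ex1, ex2, ex3,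
            pvCell_eq adn C hlen y x (by omega) (by omega),
            pvCell_eq adn C hlen (y+1) (x+1) (by omega) (by omega),
            pvCell_eq adn C hlen (y+2) (x+2) (by omega) (by omega),
            pvCell_eq adn C hlen (y+3) (x+3) (by omega) (by omega)])]
  exact pvFoldl_events (List.range (C - 3)) (pvChainDR adn y) (pvCellN adn y) st

theorem A_inner_DL (adn : List (List String)) (C : Nat)
    (hlen : ∀ y < adn.length, (pvRowN adn y).length = C)
    (y : Nat) (hy : y + 3 < adn.length) (st : List String × Int) :
    (PySem.List.pyRange 3 (PySem.List.len (PySem.List.pyGetD adn (y : Int) [])) 1).foldl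
      (fun st x =>
        match pvCell adn (y : Int) x, pvCell adn ((y : Int)+1) (x-1),
              pvCell adn ((y : Int)+2) (x-2), pvCell adn ((y : Int)+3) (x-3) with
        | some a, some b, some c, some d =>
            if a = b ∧ b = c ∧ c = d then (PySem.Set.add st.1 a, st.2 + 1) else st
        | _, _, _, _ => st) st
    = pvAddAll ((List.range (C - 3)).filterMap (fun x =>
        if pvChainDL adn y x then some (pvCellN adn y (x + 3)) else none)) st := by
  have hrowlen : PySem.List.len (PySem.List.pyGetD adn (y : Int) []) = (C : Int) := by
    rw [PySem.List.pyGetD_natCast]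
    rw [show adn.getD y [] = pvRowN adn y from rfl]
    rw [PySem.List.len_eq, hlen y (by omega)]
  rw [hrowlen, PySem.List.pyRange_one,
      show (((C : Int)) - 3).toNat = C - 3 from by omega, List.foldl_map]
  rw [PySem.List.foldl_congr_mem _ _
      (fun st (x : Nat) => if pvChainDL adn y x
        then (PySem.Set.add st.1 (pvCellN adn y (x + 3)), st.2 + 1) else st) st
      (by
        intro acc x hx
        have hx3 : x < C - 3 := List.mem_range.mp hx
        have ey1 : (y : Int) + 1 = ((y + 1 : Nat) : Int) := by push_cast; ring
        have ey2 : (y : Int) + 2 = ((y + 2 : Nat) : Int) := by push_cast; ring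
        have ey3 : (y : Int) + 3 = ((y + 3 : Nat) : Int) := by push_cast; ring
        have ex3 : (3 : Int) + (x : Int) = ((x + 3 : Nat) : Int) := by push_cast; ring
        have ex2 : ((x + 3 : Nat) : Int) - 1 = ((x + 2 : Nat) : Int) := by push_cast; ring
        have ex1 : ((x + 3 : Nat) : Int) - 2 = ((x + 1 : Nat) : Int) := by push_cast; ring
        have ex0 : ((x + 3 : Nat) : Int) - 3 = ((x : Nat) : Int) := by push_cast; ring
        rw [ey1, ey2, ey3, ex3, ex2, ex1, ex0,
            pvCell_eq adn C hlen y (x+3) (by omega) (by omega),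
            pvCell_eq adn C hlen (y+1) (x+2) (by omega) (by omega),
            pvCell_eq adn C hlen (y+2) (x+1) (by omega) (by omega),
            pvCell_eq adn C hlen (y+3) x (by omega) (by omega)])]
  exact pvFoldl_events (List.range (C - 3)) (pvChainDL adn y) (fun x => pvCellN adn y (x + 3)) st

theorem A_loop1 (adn : List (List String)) (C : Nat)
    (hlen : ∀ y < adn.length, (pvRowN adn y).length = C) (hR : 4 ≤ adn.length)
    (st0 : List String × Int) :
    (PySem.List.pyRange 0 (PySem.List.len adn - 3) 1).foldl (fun st y =>
      (PySem.List.pyRange 0 (PySem.List.len (PySem.List.pyGetD adn y []) - 3) 1).foldl (fun st x =>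
        match pvCell adn y x, pvCell adn (y+1) (x+1), pvCell adn (y+2) (x+2), pvCell adn (y+3) (x+3) with
        | some a, some b, some c, some d =>
            if a = b ∧ b = c ∧ c = d then (PySem.Set.add st.1 a, st.2 + 1) else st
        | _, _, _, _ => st) st) st0
    = pvAddAll ((List.range (adn.length - 3)).flatMap (fun y =>
        (List.range (C - 3)).filterMap (fun x =>
          if pvChainDR adn y x then some (pvCellN adn y x) else none))) st0 := by
  rw [PySem.List.pyRange_one,
      show ((PySem.List.len adn - 3) - 0).toNat = adn.length - 3 from by
        simp [PySem.List.len_eq]; omega,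
      List.foldl_map]
  rw [PySem.List.foldl_congr_mem _ _
      (fun st (y : Nat) => pvAddAll ((List.range (C - 3)).filterMap (fun x =>
        if pvChainDR adn y x then some (pvCellN adn y x) else none)) st) st0
      (by
        intro acc y hy
        have hy3 : y + 3 < adn.length := by have := List.mem_range.mp hy; omega
        simp only [zero_add]
        exact A_inner_DR adn C hlen y hy3 acc)]
  exact pvFoldl_addAll _ _ st0

theorem A_loop2 (adn : List (List String)) (C : Nat)
    (hlen : ∀ y < adn.length, (pvRowN adn y).length = C) (hR : 4 ≤ adn.length)
    (st0 : List String × Int) :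
    (PySem.List.pyRange 0 (PySem.List.len adn - 3) 1).foldl (fun st y =>
      (PySem.List.pyRange 3 (PySem.List.len (PySem.List.pyGetD adn y [])) 1).foldl (fun st x =>
        match pvCell adn y x, pvCell adn (y+1) (x-1), pvCell adn (y+2) (x-2), pvCell adn (y+3) (x-3) with
        | some a, some b, some c, some d =>
            if a = b ∧ b = c ∧ c = d then (PySem.Set.add st.1 a, st.2 + 1) else st
        | _, _, _, _ => st) st) st0
    = pvAddAll ((List.range (adn.length - 3)).flatMap (fun y =>
        (List.range (C - 3)).filterMap (fun x =>
          if pvChainDL adn y x then some (pvCellN adn y (x + 3)) else none))) st0 := by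
  rw [PySem.List.pyRange_one,
      show ((PySem.List.len adn - 3) - 0).toNat = adn.length - 3 from by
        simp [PySem.List.len_eq]; omega,
      List.foldl_map]
  rw [PySem.List.foldl_congr_mem _ _
      (fun st (y : Nat) => pvAddAll ((List.range (C - 3)).filterMap (fun x =>
        if pvChainDL adn y x then some (pvCellN adn y (x + 3)) else none)) st) st0
      (by
        intro acc y hy
        have hy3 : y + 3 < adn.length := by have := List.mem_range.mp hy; omega
        simp only [zero_add]
        exact A_inner_DL adn C hlen y hy3 acc)]
  exact pvFoldl_addAll _ _ st0

theorem A_eq (adn : List (List String)) (C : Nat)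
    (hlen : ∀ y < adn.length, (pvRowN adn y).length = C) (hR : 4 ≤ adn.length) :
    verificar_diagonal adn
      = pvAddAll ((List.range (adn.length - 3)).flatMap (fun y =>
            (List.range (C - 3)).filterMap (fun x =>
              if pvChainDL adn y x then some (pvCellN adn y (x+3)) else none)))
          (pvAddAll ((List.range (adn.length - 3)).flatMap (fun y =>
              (List.range (C - 3)).filterMap (fun x =>
                if pvChainDR adn y x then some (pvCellN adn y x) else none))) ([], 0)) := by
  simp only [verificar_diagonal]
  rw [A_loop1 adn C hlen hR ([], 0), A_loop2 adn C hlen hR _]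

theorem pvFoldl_id {a b : Type} (l : List a) (st0 : b) :
    l.foldl (fun st _ => st) st0 = st0 := by
  induction l generalizing st0 with
  | nil => rfl
  | cons x xs ih => exact ih st0

theorem pvRowN_short (adn : List (List String)) (hshort : ∀ r ∈ adn, r.length < 4)
    (k : Nat) : (pvRowN adn k).length < 4 := by
  by_cases hk : k < adn.length
  · exact hshort _ (by
      simp [pvRowN, List.getD_eq_getElem?_getD, List.getElem?_eq_getElem hk])
  · simp [pvRowN, List.getD_eq_getElem?_getD, List.getElem?_eq_none (by omega : adn.length ≤ k)]

theorem pvRowEv_short (adn : List (List String)) (delta : Int)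
    (hshort : ∀ r ∈ adn, r.length < 4) (hd : delta = 1 ∨ delta = -1) (y : Nat) :
    pvRowEv adn delta y = [] := by
  rcases Nat.lt_or_ge y 3 with hy | hy
  · exact pvRowEv_nil adn delta y hy
  · obtain ⟨y', rfl⟩ : ∃ y', y = y' + 3 := ⟨y - 3, by omega⟩
    rw [pvRowEv, List.filterMap_eq_nil_iff.mpr]
    intro x hx
    have hxlt : x < (pvRowN adn (y' + 3)).length := List.mem_range.mp hx
    rw [if_neg]
    intro habs
    obtain ⟨-, -, hdeep⟩ := (pvRl4_iff adn delta y' (x : Int)).mp habs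
    obtain ⟨hd0, hd1, -⟩ := hdeep
    rw [PySem.List.len_eq] at hd1
    have h1 := pvRowN_short adn hshort y'
    have h2 := pvRowN_short adn hshort (y' + 3)
    rcases hd with rfl | rfl <;> omega

theorem A_short_loop1 (adn : List (List String)) (hshort : ∀ r ∈ adn, r.length < 4)
    (st0 : List String × Int) :
    (PySem.List.pyRange 0 (PySem.List.len adn - 3) 1).foldl (fun st y =>
      (PySem.List.pyRange 0 (PySem.List.len (PySem.List.pyGetD adn y []) - 3) 1).foldl (fun st x =>
        match pvCell adn y x, pvCell adn (y+1) (x+1), pvCell adn (y+2) (x+2), pvCell adn (y+3) (x+3) with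
        | some a, some b, some c, some d =>
            if a = b ∧ b = c ∧ c = d then (PySem.Set.add st.1 a, st.2 + 1) else st
        | _, _, _, _ => st) st) st0 = st0 := by
  rw [PySem.List.pyRange_one,
      show ((PySem.List.len adn - 3) - 0).toNat = adn.length - 3 from by
        simp [PySem.List.len_eq]; omega,
      List.foldl_map]
  rw [PySem.List.foldl_congr_mem _ _ (fun (st : List String × Int) (_ : Nat) => st) st0
      (by
        intro acc y _
        simp only [zero_add]
        rw [PySem.List.pyRange_one,
            show ((PySem.List.len (PySem.List.pyGetD adn (y : Int) []) - 3) - 0).toNat = 0 from by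
              have := pvRowN_short adn hshort y
              rw [PySem.List.pyGetD_natCast, show adn.getD y [] = pvRowN adn y from rfl,
                PySem.List.len_eq]
              omega]
        rfl)]
  exact pvFoldl_id _ st0

theorem A_short_loop2 (adn : List (List String)) (hshort : ∀ r ∈ adn, r.length < 4)
    (st0 : List String × Int) :
    (PySem.List.pyRange 0 (PySem.List.len adn - 3) 1).foldl (fun st y =>
      (PySem.List.pyRange 3 (PySem.List.len (PySem.List.pyGetD adn y [])) 1).foldl (fun st x =>
        match pvCell adn y x, pvCell adn (y+1) (x-1), pvCell adn (y+2) (x-2), pvCell adn (y+3) (x-3) with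
        | some a, some b, some c, some d =>
            if a = b ∧ b = c ∧ c = d then (PySem.Set.add st.1 a, st.2 + 1) else st
        | _, _, _, _ => st) st) st0 = st0 := by
  rw [PySem.List.pyRange_one,
      show ((PySem.List.len adn - 3) - 0).toNat = adn.length - 3 from by
        simp [PySem.List.len_eq]; omega,
      List.foldl_map]
  rw [PySem.List.foldl_congr_mem _ _ (fun (st : List String × Int) (_ : Nat) => st) st0
      (by
        intro acc y _
        simp only [zero_add]
        rw [PySem.List.pyRange_one,
            show ((PySem.List.len (PySem.List.pyGetD adn (y : Int) [])) - 3).toNat = 0 from by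
              have := pvRowN_short adn hshort y
              rw [PySem.List.pyGetD_natCast, show adn.getD y [] = pvRowN adn y from rfl,
                PySem.List.len_eq]
              omega]
        rfl)]
  exact pvFoldl_id _ st0

theorem A_short (adn : List (List String)) (hshort : ∀ r ∈ adn, r.length < 4) :
    verificar_diagonal adn = ([], 0) := by
  simp only [verificar_diagonal]
  rw [A_short_loop1 adn hshort ([], 0), A_short_loop2 adn hshort _]

theorem B_short (adn : List (List String)) (hshort : ∀ r ∈ adn, r.length < 4) :
    verificar_diagonal_alt adn = ([], 0) := by
  rw [alt_eq]
  have hflat : ∀ d : Int, d = 1 ∨ d = -1 →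
      (List.range adn.length).flatMap (pvRowEv adn d) = [] := by
    intro d hd
    rw [List.flatMap_eq_nil_iff.mpr]
    intro y _
    exact pvRowEv_short adn d hshort hd y
  rw [hflat 1 (Or.inl rfl), hflat (-1) (Or.inr rfl)]
  simp [pvAddAll]

theorem A_small (adn : List (List String)) (hR : adn.length < 4) :
    verificar_diagonal adn = ([], 0) := by
  simp only [verificar_diagonal]
  rw [PySem.List.pyRange_one]
  rw [show ((PySem.List.len adn - 3) - 0).toNat = 0 from by
    simp [PySem.List.len_eq]; omega]
  simp

theorem B_small (adn : List (List String)) (hR : adn.length < 4) :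
    verificar_diagonal_alt adn = ([], 0) := by
  rw [alt_eq]
  have hflat : ∀ d : Int, (List.range adn.length).flatMap (pvRowEv adn d) = [] := by
    intro d
    rw [List.flatMap_eq_nil_iff.mpr]
    intro y hy
    have : y < adn.length := List.mem_range.mp hy
    exact pvRowEv_nil adn d y (by omega)
  rw [hflat, hflat]
  simp [pvAddAll]


-- ===== VERDICT (by name: the statement is the Claim_ definition above) =====
theorem verificar_diagonal_spec : Claim_equal_verificar_diagonal := by
  intro adn _ hpre
  unfold Spec_verificar_diagonal
  by_cases hR : adn.length < 4
  · rw [A_small adn hR, B_small adn hR]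
  · have hR : 4 ≤ adn.length := by omega
    rcases hpre with h | hshort | hrect
    · omega
    · rw [A_short adn hshort, B_short adn hshort]
    · have hlen : ∀ y < adn.length, (pvRowN adn y).length = (adn.headD []).length := by
        intro y hy
        exact hrect _ (by simp [pvRowN, List.getD_eq_getElem?_getD, List.getElem?_eq_getElem hy])
      rw [A_eq adn _ hlen hR, alt_eq adn, B_DR_eq adn _ hlen hR, B_DL_eq adn _ hlen hR]
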